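-- pv_equiv track=rewrite | github.com/bayne/taxes-2025 | models.py | _clean_docstring
-- ===== SOURCE A (Python) =====
-- def _clean_docstring(doc: str) -> str:
--     """Clean a Python docstring for use as a JSON Schema description.
--
--     Preserves all content including IRC section references, but normalizes
--     indentation and collapses internal whitespace.
--     """
--     if not doc:
--         return ""
--     lines = doc.strip().splitlines()
--     cleaned: list[str] = []
--     for line in lines:
--         cleaned.append(line.strip())
--     # Join lines, preserving paragraph breaks (blank lines)
--     result_parts: list[str] = []
--     for line in cleaned:
--         if line:
--             result_parts.append(line)
--         elif result_parts and result_parts[-1] != "":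
--             result_parts.append("")
--     return "\n".join(result_parts).strip()
-- ===== SOURCE B (Python) =====
-- def _clean_docstring(doc: str) -> str:
--     """Clean a docstring: strip lines, collapse blank-line runs into single paragraph breaks."""
--     if not doc:
--         return ""
--     paragraphs: list[list[str]] = []
--     current: list[str] = []
--     for line in doc.strip().splitlines():
--         s = line.strip()
--         if s:
--             current.append(s)
--         elif current:
--             paragraphs.append(current)
--             current = []
--     if current:
--         paragraphs.append(current)
--     return "\n\n".join("\n".join(p) for p in paragraphs)
-- ===== Notes on version B (the rewrite author's own statement) =====
-- stated objective: alternative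
-- what changed: B groups the stripped lines into paragraphs (runs of nonblank lines) and joins the paragraphs with a blank-line separator, instead of A's stateful flat accumulation that inspects result_parts[-1] to decide whether to emit a blank entry and then strips the joined result.
import Mathlib
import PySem

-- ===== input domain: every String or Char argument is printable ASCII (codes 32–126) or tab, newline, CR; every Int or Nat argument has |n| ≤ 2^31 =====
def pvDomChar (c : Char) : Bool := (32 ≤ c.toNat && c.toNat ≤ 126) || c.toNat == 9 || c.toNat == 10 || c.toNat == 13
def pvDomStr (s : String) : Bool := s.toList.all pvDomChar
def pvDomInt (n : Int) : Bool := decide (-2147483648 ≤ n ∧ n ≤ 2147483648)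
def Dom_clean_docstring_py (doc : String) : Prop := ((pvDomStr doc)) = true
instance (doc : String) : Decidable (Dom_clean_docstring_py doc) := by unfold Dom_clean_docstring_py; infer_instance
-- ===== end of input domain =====

-- B replaces A's stateful flat accumulation (peeking at result_parts[-1] to decide whether to
-- emit a blank entry) by grouping the stripped lines into paragraphs and joining the paragraphs
-- with a blank-line separator.

-- ===== PORT A =====
-- step of A's second loop ('for line in cleaned'); 'result_parts and result_parts[-1] != ""'
-- is ported as 'acc ≠ [] ∧ acc.getLast? ≠ some ""' — exact, since on a nonempty list
-- result_parts[-1] is its last element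
def cdStepA (acc : List String) (line : String) : List String :=
  if line ≠ "" then acc ++ [line]
  else if acc ≠ [] ∧ acc.getLast? ≠ some "" then acc ++ [""]
  else acc

def clean_docstring_py (doc : String) : String :=
  if doc = "" then ""
  else
    let lines := PySem.Str.splitlines (PySem.Str.strip doc)
    let cleaned := lines.map (fun line => PySem.Str.strip line)
    let result_parts := cleaned.foldl cdStepA []
    PySem.Str.strip (PySem.Str.join "\n" result_parts)

-- ===== PORT B =====
-- step of B's single loop: state = (paragraphs so far, current paragraph)
def cdStepB (st : List (List String) × List String) (line : String) :
    List (List String) × List String :=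
  let s := PySem.Str.strip line
  if s ≠ "" then (st.1, st.2 ++ [s])
  else if st.2 ≠ [] then (st.1 ++ [st.2], [])
  else st

def clean_docstring_py_alt (doc : String) : String :=
  if doc = "" then ""
  else
    let st := (PySem.Str.splitlines (PySem.Str.strip doc)).foldl cdStepB ([], [])
    let paragraphs := if st.2 ≠ [] then st.1 ++ [st.2] else st.1
    PySem.Str.join "\n\n" (paragraphs.map (fun p => PySem.Str.join "\n" p))

-- ===== PRECONDITION & SPEC =====
def Spec_clean_docstring_py (doc : String) (out : String) : Prop := out = clean_docstring_py_alt doc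
instance (doc : String) (out : String) : Decidable (Spec_clean_docstring_py doc out) := by unfold Spec_clean_docstring_py; infer_instance

-- ===== CLAIM (what is proved, stated in full; the proofs are below) =====
def Claim_equal_clean_docstring_py : Prop := ∀ (doc : String), Dom_clean_docstring_py doc → Spec_clean_docstring_py doc (clean_docstring_py doc)

-- ===== LEMMAS AND PROOFS =====

-- a char list is "good" when it is nonempty and has no whitespace at either end
def cdGoodC (cs : List Char) : Prop :=
  cs ≠ [] ∧ (∀ c ∈ cs.head?, PySem.Chars.isspace c = false) ∧
    (∀ c ∈ cs.getLast?, PySem.Chars.isspace c = false)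

def cdGood (s : String) : Prop := cdGoodC s.toList

-- A's result_parts, reconstructed from B's state (paragraphs, current)
def cdFlat (ps : List (List String)) (cur : List String) : List String :=
  List.intercalate [""] ps ++ (if ps = [] then [] else [""]) ++ cur

-- the invariant carried by both loops
def cdInv (ps : List (List String)) (cur : List String) : Prop :=
  (∀ p ∈ ps, p ≠ [] ∧ ∀ s ∈ p, cdGood s) ∧ (∀ s ∈ cur, cdGood s)

-- char-level join of a paragraph
def cdG (p : List String) : List Char := List.intercalate ['\n'] (p.map String.toList)

lemma cd_icat_cons {α : Type} (sep x : List α) (ys : List (List α)) (hy : ys ≠ []) :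
    List.intercalate sep (x :: ys) = x ++ sep ++ List.intercalate sep ys := by
  obtain ⟨z, zs, rfl⟩ := List.exists_cons_of_ne_nil hy
  simp [List.intercalate, List.intersperse]

lemma cd_icat_append {α : Type} (sep : List α) (xs ys : List (List α))
    (hx : xs ≠ []) (hy : ys ≠ []) :
    List.intercalate sep (xs ++ ys) =
      List.intercalate sep xs ++ sep ++ List.intercalate sep ys := by
  induction xs with
  | nil => exact absurd rfl hx
  | cons x xs ih =>
    cases xs with
    | nil =>
      rw [show ([x] : List (List α)) ++ ys = x :: ys from rfl, cd_icat_cons sep x ys hy]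
      simp [List.intercalate]
    | cons x' xs' =>
      rw [List.cons_append, cd_icat_cons sep x (x' :: xs' ++ ys) (by simp),
        cd_icat_cons sep x (x' :: xs') (by simp), ih (by simp)]
      simp

lemma cd_icat_concat {α : Type} (sep x : List α) (xs : List (List α)) (hx : xs ≠ []) :
    List.intercalate sep (xs ++ [x]) = List.intercalate sep xs ++ sep ++ x := by
  rw [cd_icat_append sep xs [x] hx (by simp)]
  simp [List.intercalate]

lemma cd_icat_ne_nil (P : List (List String)) (hP : P ≠ []) (h : ∀ p ∈ P, p ≠ []) :
    List.intercalate [""] P ≠ [] := by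
  cases P with
  | nil => exact absurd rfl hP
  | cons p ps =>
    cases ps with
    | nil =>
      simpa [List.intercalate] using h p (by simp)
    | cons q qs =>
      rw [cd_icat_cons [""] p (q :: qs) (by simp)]
      have := h p (by simp)
      cases p with
      | nil => exact absurd rfl this
      | cons a b => simp

lemma cd_head_dropWhile (p : Char → Bool) (xs : List Char) :
    ∀ c ∈ (List.dropWhile p xs).head?, p c = false := by
  induction xs with
  | nil => simp
  | cons x xs ih =>
    intro c hc
    rw [List.dropWhile_cons] at hc
    by_cases hx : p x = true
    · rw [if_pos hx] at hc
      exact ih c hc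
    · rw [if_neg hx] at hc
      simp only [List.head?_cons, Option.mem_def, Option.some.injEq] at hc
      subst hc
      simpa using hx

lemma cd_dropWhile_id (p : Char → Bool) (xs : List Char)
    (h : ∀ c ∈ xs.head?, p c = false) : List.dropWhile p xs = xs := by
  cases xs with
  | nil => rfl
  | cons x t =>
    have := h x (by simp)
    simp [this]

-- the endpoints of a nonempty strip result are not whitespace
lemma cd_goodC_strip (cs : List Char) (h : PySem.Chars.strip cs ≠ []) :
    cdGoodC (PySem.Chars.strip cs) := by
  refine ⟨h, ?_, ?_⟩
  · -- head: strip cs is (dropWhile W ((lstrip cs).reverse)).reverse, a prefix of lstrip cs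
    intro c hc
    simp only [Option.mem_def] at hc
    obtain ⟨t, ht⟩ :=
      List.dropWhile_suffix (l := (PySem.Chars.lstrip cs).reverse) PySem.Chars.isspace
    have hls : PySem.Chars.lstrip cs = PySem.Chars.strip cs ++ t.reverse := by
      have h2 := congrArg List.reverse ht
      rw [List.reverse_append, List.reverse_reverse] at h2
      rw [PySem.Chars.strip, PySem.Chars.rstrip]
      exact h2.symm
    have hhd : (PySem.Chars.lstrip cs).head? = some c := by
      rw [hls, List.head?_append, hc]
      rfl
    exact cd_head_dropWhile PySem.Chars.isspace cs c
      (by simpa [PySem.Chars.lstrip, Option.mem_def] using hhd)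
  · -- last: getLast? (reverse l) = head? l
    intro c hc
    simp only [Option.mem_def] at hc
    rw [PySem.Chars.strip, PySem.Chars.rstrip, List.getLast?_reverse] at hc
    exact cd_head_dropWhile PySem.Chars.isspace (PySem.Chars.lstrip cs).reverse c
      (by simp [Option.mem_def, hc])

lemma cd_strip_id (cs : List Char) (h : cdGoodC cs) : PySem.Chars.strip cs = cs := by
  obtain ⟨hne, hh, hl⟩ := h
  have h1 : PySem.Chars.lstrip cs = cs := cd_dropWhile_id _ cs hh
  rw [PySem.Chars.strip, h1, PySem.Chars.rstrip]
  have h2 : List.dropWhile PySem.Chars.isspace cs.reverse = cs.reverse := by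
    apply cd_dropWhile_id
    intro c hc
    exact hl c (by simpa [List.head?_reverse] using hc)
  rw [h2, List.reverse_reverse]

lemma cd_strip_concat_nl (cs : List Char) (h : cdGoodC cs) :
    PySem.Chars.strip (cs ++ ['\n']) = cs := by
  obtain ⟨hne, hh, hl⟩ := h
  have h1 : PySem.Chars.lstrip (cs ++ ['\n']) = cs ++ ['\n'] := by
    apply cd_dropWhile_id
    intro c hc
    cases cs with
    | nil => exact absurd rfl hne
    | cons a b => simp at hc; subst hc; exact hh a (by simp)
  rw [PySem.Chars.strip, h1, PySem.Chars.rstrip]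
  have h2 : List.dropWhile PySem.Chars.isspace (cs ++ ['\n']).reverse =
      cs.reverse := by
    rw [List.reverse_append]
    simp only [List.reverse_singleton, List.singleton_append, List.dropWhile_cons]
    rw [if_pos (by decide)]
    apply cd_dropWhile_id
    intro c hc
    exact hl c (by simpa [List.head?_reverse] using hc)
  rw [h2, List.reverse_reverse]

lemma cd_goodC_append (a b m : List Char) (ha : cdGoodC a) (hb : cdGoodC b) :
    cdGoodC (a ++ m ++ b) := by
  obtain ⟨hane, hah, hal⟩ := ha
  obtain ⟨hbne, hbh, hbl⟩ := hb
  refine ⟨by simp [hane], ?_, ?_⟩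
  · intro c hc
    apply hah
    cases a with
    | nil => exact absurd rfl hane
    | cons x t => simpa using hc
  · intro c hc
    simp only [Option.mem_def] at hc
    rw [List.getLast?_append_of_ne_nil (a ++ m) hbne] at hc
    exact hbl c (by simp [Option.mem_def, hc])

lemma cd_goodC_G (p : List String) (hne : p ≠ []) (hg : ∀ s ∈ p, cdGood s) :
    cdGoodC (cdG p) := by
  induction p with
  | nil => exact absurd rfl hne
  | cons s rest ih =>
    cases rest with
    | nil => simpa [cdG, List.intercalate] using hg s (by simp)
    | cons s' rest' =>
      have : cdG (s :: s' :: rest') =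
          s.toList ++ ['\n'] ++ cdG (s' :: rest') := by
        simp only [cdG, List.map_cons]
        exact cd_icat_cons ['\n'] s.toList _ (by simp)
      rw [this]
      exact cd_goodC_append _ _ _ (hg s (by simp)) (ih (by simp) (fun t ht => hg t (by simp [ht])))

-- the central join identity: one "\n"-join over ""-separated paragraphs equals
-- the "\n\n"-join of the per-paragraph "\n"-joins
lemma cd_join_eq (P : List (List String)) (hP : P ≠ [])
    (h : ∀ p ∈ P, p ≠ [] ∧ ∀ s ∈ p, cdGood s) :
    cdG (List.intercalate [""] P) = List.intercalate ['\n', '\n'] (P.map cdG) ∧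
      cdGoodC (cdG (List.intercalate [""] P)) := by
  induction P with
  | nil => exact absurd rfl hP
  | cons p P ih =>
    cases P with
    | nil =>
      refine ⟨by simp [List.intercalate], ?_⟩
      simpa [List.intercalate] using cd_goodC_G p (h p (by simp)).1 (h p (by simp)).2
    | cons q Q =>
      have hQ : (q :: Q : List (List String)) ≠ [] := by simp
      have hrest := ih hQ (fun r hr => h r (by simp [hr]))
      have hicat_ne : List.intercalate [""] (q :: Q) ≠ [] :=
        cd_icat_ne_nil _ hQ (fun r hr => (h r (by simp [hr])).1)
      have hpne : p ≠ [] := (h p (by simp)).1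
      have hsplit : List.intercalate [""] (p :: q :: Q) =
          p ++ [""] ++ List.intercalate [""] (q :: Q) :=
        cd_icat_cons [""] p (q :: Q) hQ
      have hG : cdG (List.intercalate [""] (p :: q :: Q)) =
          cdG p ++ ['\n', '\n'] ++ cdG (List.intercalate [""] (q :: Q)) := by
        rw [hsplit, List.append_assoc]
        show List.intercalate ['\n']
            ((p ++ ([""] ++ List.intercalate [""] (q :: Q))).map String.toList) = _
        rw [List.map_append,
          cd_icat_append ['\n'] (p.map String.toList) _ (by simp [hpne]) (by simp),
          show (([""] ++ List.intercalate [""] (q :: Q)).map String.toList) =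
            ([] : List Char) :: (List.intercalate [""] (q :: Q)).map String.toList by simp,
          cd_icat_cons ['\n'] ([] : List Char) _ (by simpa using hicat_ne)]
        simp [cdG, List.append_assoc]
      constructor
      · rw [hG, hrest.1]
        rw [show (p :: q :: Q).map cdG = cdG p :: (q :: Q).map cdG by simp]
        rw [cd_icat_cons ['\n', '\n'] (cdG p) _ (by simp)]
      · rw [hG]
        exact cd_goodC_append _ _ _ (cd_goodC_G p hpne (h p (by simp)).2) hrest.2

lemma cd_flat_concat (ps : List (List String)) (cur : List String) (_hcur : cur ≠ []) :
    cdFlat ps cur = List.intercalate [""] (ps ++ [cur]) := by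
  cases ps with
  | nil => simp [cdFlat, List.intercalate]
  | cons p ps' =>
    rw [cdFlat, cd_icat_concat [""] cur (p :: ps') (by simp)]
    simp

-- one step of the two loops, in lockstep
lemma cd_stepA_pos (acc : List String) (s : String) (hs : s ≠ "") :
    cdStepA acc s = acc ++ [s] := by
  simp [cdStepA, hs]

lemma cd_stepA_blank (acc : List String) :
    cdStepA acc "" = if acc ≠ [] ∧ acc.getLast? ≠ some "" then acc ++ [""] else acc := by
  simp [cdStepA]

-- one step of the two loops, in lockstep
lemma cd_step (ps : List (List String)) (cur : List String) (line : String)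
    (hinv : cdInv ps cur) :
    cdStepA (cdFlat ps cur) (PySem.Str.strip line) =
      cdFlat (cdStepB (ps, cur) line).1 (cdStepB (ps, cur) line).2 ∧
    cdInv (cdStepB (ps, cur) line).1 (cdStepB (ps, cur) line).2 := by
  by_cases hs : PySem.Str.strip line = ""
  · have hB : cdStepB (ps, cur) line =
        if cur = [] then (ps, cur) else (ps ++ [cur], []) := by
      simp [cdStepB, hs]
    by_cases hc : cur = []
    · rw [hB, if_pos hc]
      refine ⟨?_, hinv⟩
      rw [hs, cd_stepA_blank, if_neg ?_]
      rintro ⟨hne, hlast⟩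
      apply hlast
      subst hc
      cases hps : ps with
      | nil => subst hps; simp [cdFlat, List.intercalate] at hne
      | cons p ps' =>
        rw [← hps, cdFlat, hps]
        simp only [List.append_nil, reduceCtorEq, not_false_eq_true, if_neg]
        rw [List.getLast?_append_of_ne_nil _ (by simp)]
        decide
    · rw [hB, if_neg hc]
      refine ⟨?_, ?_⟩
      · rw [hs, cd_stepA_blank, if_pos ?_]
        · rw [cd_flat_concat ps cur hc]
          simp [cdFlat]
        · constructor
          · simp [cdFlat, hc]
          · rw [cdFlat, List.append_assoc, List.getLast?_append_of_ne_nil _ (by simp [hc]),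
              List.getLast?_append_of_ne_nil _ hc]
            cases hcl : cur.getLast? with
            | none => simp
            | some s =>
              have hmem : s ∈ cur := List.mem_of_getLast? hcl
              have hgood := hinv.2 s hmem
              have : s ≠ "" := by
                intro h; rw [h] at hgood; exact hgood.1 rfl
              simpa using this
      · refine ⟨?_, by simp⟩
        intro p hp
        rcases List.mem_append.mp hp with h1 | h1
        · exact hinv.1 p h1
        · simp only [List.mem_singleton] at h1; subst h1; exact ⟨hc, hinv.2⟩
  · have hB : cdStepB (ps, cur) line = (ps, cur ++ [PySem.Str.strip line]) := by
      simp [cdStepB, hs]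
    have hgood : cdGood (PySem.Str.strip line) := by
      rw [cdGood, PySem.Str.toList_strip]
      apply cd_goodC_strip
      intro h0
      apply hs
      apply String.toList_inj.mp
      rw [PySem.Str.toList_strip, h0]
      rfl
    rw [hB]
    refine ⟨?_, ?_⟩
    · rw [cd_stepA_pos _ _ hs]
      simp [cdFlat]
    · refine ⟨hinv.1, ?_⟩
      intro s hsmem
      rcases List.mem_append.mp hsmem with h1 | h1
      · exact hinv.2 s h1
      · simp only [List.mem_singleton] at h1; subst h1; exact hgood

lemma cd_loop (lines : List String) (ps : List (List String)) (cur : List String)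
    (hinv : cdInv ps cur) :
    (lines.map PySem.Str.strip).foldl cdStepA (cdFlat ps cur) =
      cdFlat (lines.foldl cdStepB (ps, cur)).1 (lines.foldl cdStepB (ps, cur)).2 ∧
    cdInv (lines.foldl cdStepB (ps, cur)).1 (lines.foldl cdStepB (ps, cur)).2 := by
  induction lines generalizing ps cur with
  | nil => exact ⟨rfl, hinv⟩
  | cons line rest ih =>
    obtain ⟨hstep, hinv'⟩ := cd_step ps cur line hinv
    have := ih (cdStepB (ps, cur) line).1 (cdStepB (ps, cur) line).2 hinv'
    simpa [List.foldl_cons, hstep] using this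

lemma cd_main (lines : List String) :
    PySem.Str.strip (PySem.Str.join "\n"
      ((lines.map (fun line => PySem.Str.strip line)).foldl cdStepA [])) =
    PySem.Str.join "\n\n"
      ((if (lines.foldl cdStepB ([], [])).2 ≠ [] then
          (lines.foldl cdStepB ([], [])).1 ++ [(lines.foldl cdStepB ([], [])).2]
        else (lines.foldl cdStepB ([], [])).1).map (fun p => PySem.Str.join "\n" p)) := by
  have hnl : ("\n" : String).toList = ['\n'] := by decide
  have hnl2 : ("\n\n" : String).toList = ['\n', '\n'] := by decide
  obtain ⟨hfold, hinv⟩ := cd_loop lines [] [] ⟨by simp, by simp⟩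
  set st := lines.foldl cdStepB ([], []) with hst
  have hflat0 : cdFlat [] [] = [] := by simp [cdFlat, List.intercalate]
  have hA : lines.map (fun line => PySem.Str.strip line) = lines.map PySem.Str.strip := rfl
  rw [hflat0] at hfold
  rw [hA, hfold]
  apply String.toList_inj.mp
  rw [PySem.Str.toList_strip, PySem.Str.toList_join, PySem.Str.toList_join, hnl, hnl2]
  by_cases hc : st.2 = []
  · by_cases hp : st.1 = []
    · simp [hc, hp, cdFlat, PySem.Chars.join, List.intercalate, PySem.Chars.strip,
        PySem.Chars.lstrip, PySem.Chars.rstrip]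
    · -- a blank line came last: A's result_parts carries a trailing "" that strip removes
      have hgood : ∀ p ∈ st.1, p ≠ [] ∧ ∀ s ∈ p, cdGood s := hinv.1
      obtain ⟨hjoin, hgoodG⟩ := cd_join_eq st.1 hp hgood
      have hflat : cdFlat st.1 st.2 = List.intercalate [""] st.1 ++ [""] := by
        simp [cdFlat, hc, hp]
      rw [hflat]
      have hG2 : PySem.Chars.join ['\n']
          ((List.intercalate [""] st.1 ++ [""]).map String.toList) =
          cdG (List.intercalate [""] st.1) ++ ['\n'] := by
        show List.intercalate ['\n'] _ = _
        rw [List.map_append,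
          show (([""] : List String).map String.toList) = [([] : List Char)] by decide,
          cd_icat_concat ['\n'] ([] : List Char) _
            (by simpa using cd_icat_ne_nil st.1 hp (fun p h => (hgood p h).1))]
        simp [cdG]
      rw [hG2, cd_strip_concat_nl _ hgoodG, hjoin, hc]
      rw [if_neg (by simp)]
      show _ = List.intercalate ['\n', '\n'] _
      rw [List.map_map]
      congr 1
      apply List.map_congr_left
      intro p _
      show cdG p = (PySem.Str.join "\n" p).toList
      rw [PySem.Str.toList_join, hnl]
      rfl
  · have hP : st.1 ++ [st.2] ≠ [] := by simp
    have hgood : ∀ p ∈ st.1 ++ [st.2], p ≠ [] ∧ ∀ s ∈ p, cdGood s := by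
      intro p hpm
      rcases List.mem_append.mp hpm with h1 | h1
      · exact hinv.1 p h1
      · simp only [List.mem_singleton] at h1; subst h1; exact ⟨hc, hinv.2⟩
    obtain ⟨hjoin, hgoodG⟩ := cd_join_eq (st.1 ++ [st.2]) hP hgood
    rw [cd_flat_concat st.1 st.2 hc]
    show PySem.Chars.strip (cdG (List.intercalate [""] (st.1 ++ [st.2]))) = _
    rw [cd_strip_id _ hgoodG, hjoin, if_pos hc]
    show _ = List.intercalate ['\n', '\n'] _
    rw [List.map_map]
    congr 1
    apply List.map_congr_left
    intro p _
    show cdG p = (PySem.Str.join "\n" p).toList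
    rw [PySem.Str.toList_join, hnl]
    rfl

-- ===== VERDICT (by name: the statement is the Claim_ definition above) =====
theorem clean_docstring_py_spec : Claim_equal_clean_docstring_py := by
  intro doc _
  unfold Spec_clean_docstring_py clean_docstring_py clean_docstring_py_alt
  by_cases hdoc : doc = ""
  · simp [hdoc]
  · rw [if_neg hdoc, if_neg hdoc]
    exact cd_main (PySem.Str.splitlines (PySem.Str.strip doc))
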